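-- pv_equiv track=rewrite | github.com/giokim12/Algorithm-Sites | 프로그래머스/lv1/82612. 부족한 금액 계산하기/부족한 금액 계산하기.py | solution
-- ===== SOURCE A (Python) =====
-- def solution(price, money, count):
--     times = 0
--     answer = 0
--     for i in range(1, count+1):
--         times += i
--
--     answer = price*times-money
--     if answer > 0:
--         return answer
--     else: return 0
-- ===== SOURCE B (Python) =====
-- def solution(price, money, count):
--     n = count if count > 0 else 0
--     shortage = price * n * (n + 1) // 2 - money
--     return shortage if shortage > 0 else 0
-- ===== Notes on version B (the rewrite author's own statement) =====
-- stated objective: faster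
-- what changed: Replaces the O(count) summation loop by the closed-form triangular number count*(count+1)//2.
import Mathlib
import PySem

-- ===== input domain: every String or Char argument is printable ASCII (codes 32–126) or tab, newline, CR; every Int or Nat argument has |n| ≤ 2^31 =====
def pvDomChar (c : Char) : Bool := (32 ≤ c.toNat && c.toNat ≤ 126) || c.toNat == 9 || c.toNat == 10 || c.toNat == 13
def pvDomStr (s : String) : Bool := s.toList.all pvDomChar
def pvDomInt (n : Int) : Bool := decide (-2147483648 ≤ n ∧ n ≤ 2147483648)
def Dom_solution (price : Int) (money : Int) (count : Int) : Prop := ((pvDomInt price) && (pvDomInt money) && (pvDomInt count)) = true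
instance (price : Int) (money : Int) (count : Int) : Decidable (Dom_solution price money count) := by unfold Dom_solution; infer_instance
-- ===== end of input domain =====

-- B replaces A's O(count) summation loop by the closed-form triangular number count*(count+1)//2 (O(1)).


-- ===== PORT A =====
def solution (price : Int) (money : Int) (count : Int) : Int :=
  let times := (PySem.List.pyRange 1 (count + 1) 1).foldl (· + ·) 0
  let answer := price * times - money
  if answer > 0 then answer else 0

-- ===== PORT B =====
def solution_alt (price : Int) (money : Int) (count : Int) : Int :=
  let n := if count > 0 then count else 0
  let shortage := PySem.Int.floordiv (price * n * (n + 1)) 2 - money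
  if shortage > 0 then shortage else 0

-- ===== PRECONDITION & SPEC =====
def Spec_solution (price : Int) (money : Int) (count : Int) (out : Int) : Prop := out = solution_alt price money count
instance (price : Int) (money : Int) (count : Int) (out : Int) : Decidable (Spec_solution price money count out) := by unfold Spec_solution; infer_instance

-- ===== CLAIM (what is proved, stated in full; the proofs are below) =====
def Claim_equal_solution : Prop := ∀ (price : Int) (money : Int) (count : Int), Dom_solution price money count → Spec_solution price money count (solution price money count)

-- ===== LEMMAS AND PROOFS =====

-- the loop sum over range(1, m+1) doubled is m*(m+1)
theorem pv_sum_range_doubled (m : Nat) :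
    ((List.range m).map (fun k : Nat => (1 : Int) + k)).foldl (· + ·) 0 * 2 = (m : Int) * (m + 1) := by
  induction m with
  | zero => simp
  | succ m ih =>
    rw [List.range_succ, List.map_append, List.foldl_append]
    simp only [List.map_cons, List.map_nil, List.foldl_cons, List.foldl_nil]
    push_cast
    nlinarith [ih]

theorem pv_times_eq (count : Int) :
    (PySem.List.pyRange 1 (count + 1) 1).foldl (· + ·) 0 * 2
      = (count.toNat : Int) * ((count.toNat : Int) + 1) := by
  rw [PySem.List.pyRange_one]
  have : (count + 1 - 1).toNat = count.toNat := by omega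
  rw [this]
  exact pv_sum_range_doubled count.toNat

-- ===== VERDICT (by name: the statement is the Claim_ definition above) =====
theorem solution_spec : Claim_equal_solution := by
  intro price money count _
  unfold Spec_solution solution solution_alt
  dsimp only
  have h2 := pv_times_eq count
  set S := (PySem.List.pyRange 1 (count + 1) 1).foldl (· + ·) 0 with hS
  have hn : (if count > 0 then count else 0) = (count.toNat : Int) := by
    split_ifs with h <;> omega
  rw [hn]
  have : price * (count.toNat : Int) * ((count.toNat : Int) + 1) = price * S * 2 := by
    linear_combination (-price) * h2
  rw [this]
  have hdiv : PySem.Int.floordiv (price * S * 2) 2 = price * S := by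
    simp [PySem.Int.floordiv]
  rw [hdiv]
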